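-- pv_equiv track=rewrite | github.com/ujicaesar95/ujian | ujian/ujianpython3.py | rowSumOddNumbers
-- ===== SOURCE A (Python) =====
-- def rowSumOddNumbers(n):
--     theList = []
--     nilai = 1
--
--     for i in range(1, n+1):
--         rowList = []
--         for j in range(i):
--             rowList.append(nilai)
--             nilai += 2
--         theList.append(rowList)
--     return theList
-- ===== SOURCE B (Python) =====
-- def rowSumOddNumbers(n):
--     result = []
--     for i in range(1, n + 1):
--         start = i * i - i + 1
--         result.append(list(range(start, start + 2 * i, 2)))
--     return result
-- ===== Notes on version B (the rewrite author's own statement) =====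
-- stated objective: alternative
-- what changed: Each row's first odd number is computed in closed form (i*i - i + 1) and the row emitted as a single stride-2 range, replacing A's single running counter threaded across all rows and its element-by-element inner append loop.
import Mathlib
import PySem

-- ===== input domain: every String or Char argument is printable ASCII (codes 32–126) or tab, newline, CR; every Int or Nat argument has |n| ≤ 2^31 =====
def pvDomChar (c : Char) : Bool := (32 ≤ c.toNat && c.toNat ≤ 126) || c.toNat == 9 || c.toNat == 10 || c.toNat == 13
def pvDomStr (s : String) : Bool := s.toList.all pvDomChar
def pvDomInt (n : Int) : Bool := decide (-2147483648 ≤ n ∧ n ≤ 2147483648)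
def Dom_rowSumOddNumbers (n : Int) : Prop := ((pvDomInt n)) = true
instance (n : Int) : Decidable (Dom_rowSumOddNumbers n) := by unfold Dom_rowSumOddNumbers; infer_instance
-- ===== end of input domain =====

-- B computes each row's first odd number from the row index alone (i*i - i + 1) and emits the
-- row as one stride-2 range, instead of A's single running counter threaded across all rows.

-- ===== PORT A =====
-- state: (theList, nilai); inner loop appends nilai and bumps it by 2, i times
def rowSumOddNumbers (n : Int) : List (List Int) :=
  ((PySem.List.pyRange 1 (n + 1) 1).foldl
    (fun (st : List (List Int) × Int) i =>
      let inner := (PySem.List.pyRange 0 i 1).foldl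
        (fun (st2 : List Int × Int) _ => (st2.1 ++ [st2.2], st2.2 + 2)) (([] : List Int), st.2)
      (st.1 ++ [inner.1], inner.2))
    (([] : List (List Int)), 1)).1

-- ===== PORT B =====
def rowSumOddNumbers_alt (n : Int) : List (List Int) :=
  (PySem.List.pyRange 1 (n + 1) 1).foldl
    (fun (acc : List (List Int)) i =>
      acc ++ [PySem.List.pyRange (i * i - i + 1) (i * i - i + 1 + 2 * i) 2])
    []

-- ===== PRECONDITION & SPEC =====
def Spec_rowSumOddNumbers (n : Int) (out : List (List Int)) : Prop := out = rowSumOddNumbers_alt n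
instance (n : Int) (out : List (List Int)) : Decidable (Spec_rowSumOddNumbers n out) := by unfold Spec_rowSumOddNumbers; infer_instance

-- ===== CLAIM (what is proved, stated in full; the proofs are below) =====
def Claim_equal_rowSumOddNumbers : Prop := ∀ (n : Int), Dom_rowSumOddNumbers n → Spec_rowSumOddNumbers n (rowSumOddNumbers n)

-- ===== LEMMAS AND PROOFS =====

-- A's inner loop, run over any list of length k from counter v, appends v, v+2, …, v+2(k-1)
-- and leaves the counter at v + 2k.
theorem pvInner (l : List Int) (acc : List Int) (v : Int) :
    l.foldl (fun (st2 : List Int × Int) _ => (st2.1 ++ [st2.2], st2.2 + 2)) (acc, v)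
      = (acc ++ List.map (fun k : Nat => v + 2 * (k : Int)) (List.range l.length), v + 2 * l.length) := by
  induction l generalizing acc v with
  | nil => simp
  | cons x xs ih =>
      simp only [List.foldl_cons, ih, List.length_cons]
      simp only [Prod.mk.injEq]
      constructor
      · rw [List.range_succ_eq_map]
        simp only [List.map_cons, List.map_map, List.append_assoc,
          List.cons_append, List.nil_append]
        congr 1
        congr 1
        · norm_num
        · apply List.map_congr_left; intro k _; simp only [Function.comp_apply]; push_cast; ring
      · push_cast; ring

-- B's row i (i ≥ 0) as a mapped range.
theorem pvRow (i : Int) (hi : 0 ≤ i) :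
    PySem.List.pyRange (i * i - i + 1) (i * i - i + 1 + 2 * i) 2
      = List.map (fun k : Nat => i * i - i + 1 + 2 * (k : Int)) (List.range i.toNat) := by
  rw [PySem.List.pyRange_of_pos _ _ (by norm_num : (0:Int) < 2)]
  rcases eq_or_lt_of_le hi with h | h
  · simp [← h]
  · rw [if_pos (by omega)]
    have : (i * i - i + 1 + 2 * i - (i * i - i + 1) + 2 - 1) / 2 = i := by
      have : i * i - i + 1 + 2 * i - (i * i - i + 1) + 2 - 1 = 2 * i + 1 := by ring
      rw [this]; omega
    rw [this]

-- Main invariant: after the first m rows, A's accumulator is B's list of rows and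
-- A's counter equals m*m + m + 1.
theorem pvOuter (m : Nat) :
    ((PySem.List.pyRange 1 ((m : Int) + 1) 1).foldl
      (fun (st : List (List Int) × Int) i =>
        let inner := (PySem.List.pyRange 0 i 1).foldl
          (fun (st2 : List Int × Int) _ => (st2.1 ++ [st2.2], st2.2 + 2)) (([] : List Int), st.2)
        (st.1 ++ [inner.1], inner.2))
      (([] : List (List Int)), 1))
    = ((PySem.List.pyRange 1 ((m : Int) + 1) 1).foldl
        (fun (acc : List (List Int)) i =>
          acc ++ [PySem.List.pyRange (i * i - i + 1) (i * i - i + 1 + 2 * i) 2]) [],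
       (m : Int) * m + m + 1) := by
  induction m with
  | zero =>
      rw [show ((0:Nat):Int) + 1 = 1 by norm_num, PySem.List.pyRange_one_eq_nil (le_refl 1)]
      simp
  | succ k ih =>
      have h1 : ((k + 1 : Nat) : Int) + 1 = ((k : Int) + 1) + 1 := by push_cast; ring
      rw [h1, PySem.List.pyRange_one_succ_right (by omega : (1:Int) ≤ (k:Int) + 1)]
      rw [List.foldl_append, List.foldl_append, ih]
      simp only [List.foldl_cons, List.foldl_nil]
      have hk1 : (0:Int) ≤ (k:Int) + 1 := by omega
      rw [pvInner, pvRow _ hk1]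
      have hlen : (PySem.List.pyRange 0 ((k:Int) + 1) 1).length = ((k:Int)+1).toNat := by
        rw [PySem.List.length_pyRange_one]; norm_num
      rw [hlen]
      simp only [Prod.mk.injEq, List.nil_append]
      constructor
      · congr 2
        · apply List.map_congr_left; intro j _; ring
      · have h2 : (((k:Int)+1).toNat : Int) = (k:Int) + 1 := by omega
        rw [h2]; push_cast; ring

-- ===== VERDICT (by name: the statement is the Claim_ definition above) =====
theorem rowSumOddNumbers_spec : Claim_equal_rowSumOddNumbers := by
  intro n _
  unfold Spec_rowSumOddNumbers rowSumOddNumbers rowSumOddNumbers_alt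
  by_cases h : n ≤ 0
  · rw [PySem.List.pyRange_one_eq_nil (by omega)]; simp
  · obtain ⟨m, rfl⟩ : ∃ m : Nat, n = (m : Int) := ⟨n.toNat, by omega⟩
    rw [pvOuter]
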